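-- pv_equiv track=rewrite | github.com/ndiekema/CPE101 | Projects/Project3/solverFuncs.py | check_columns_valid
-- ===== SOURCE A (Python) =====
-- def check_columns_valid(puzzle):
--     x = 0
--     five = [1,2,3,4,5]
--     valid = True
--     while x < 5:
--         column = [puzzle[0][x], puzzle[1][x], puzzle[2][x], puzzle[3][x], puzzle[4][x]]
--         for i in five:
--            if column.count(i) > 1:
--               valid = False
--               break
--
--         x += 1
--
--     if valid == True:
--         return True
--     else:
--         return False
-- ===== SOURCE B (Python) =====
-- def check_columns_valid(puzzle):
--     # A column of the 5x5 grid is valid when no digit 1-5 occurs in it twice;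
--     # any other cell value (e.g. 0 for an empty cell) cannot clash.
--     for x in range(5):
--         column = [puzzle[y][x] for y in range(5)]
--         digits = [v for v in column if v in (1, 2, 3, 4, 5)]
--         if len(set(digits)) != len(digits):
--             return False
--     return True
-- ===== Notes on version B (the rewrite author's own statement) =====
-- stated objective: idiomatic
-- what changed: B iterates the five columns with a list comprehension per column, collects the digits 1-5 the column contains and compares len(set(digits)) with len(digits) with an early return, instead of A's while-loop that counts each of the values 1..5 separately with list.count under a valid flag.
import Mathlib
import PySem

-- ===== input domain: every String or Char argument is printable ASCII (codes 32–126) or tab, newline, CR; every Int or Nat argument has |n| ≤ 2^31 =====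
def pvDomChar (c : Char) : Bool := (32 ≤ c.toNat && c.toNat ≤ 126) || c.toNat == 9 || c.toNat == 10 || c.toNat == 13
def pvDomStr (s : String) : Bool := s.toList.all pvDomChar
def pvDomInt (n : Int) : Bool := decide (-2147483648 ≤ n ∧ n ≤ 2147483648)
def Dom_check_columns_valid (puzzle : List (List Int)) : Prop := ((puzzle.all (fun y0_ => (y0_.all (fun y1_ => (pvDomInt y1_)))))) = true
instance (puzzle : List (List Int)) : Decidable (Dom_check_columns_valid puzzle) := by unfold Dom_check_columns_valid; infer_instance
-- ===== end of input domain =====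

-- B iterates the five columns with a comprehension per column and checks that the
-- digits 1-5 the column contains are pairwise distinct (len(set(digits)) == len(digits)),
-- instead of A's per-value count loop under a valid flag (objective: idiomatic).

-- ===== PORT A =====
-- 'for i in five: if column.count(i) > 1: valid = False; break'
def pvInnerA (column : List Int) : List Int → Bool → Bool
  | [], valid => valid
  | i :: rest, valid =>
    if 1 < PySem.List.count column i then false
    else pvInnerA column rest valid

def check_columns_valid (puzzle : List (List Int)) : Bool :=
  let five : List Int := [1, 2, 3, 4, 5]
  let valid := (PySem.List.pyRange 0 5 1).foldl (fun valid x =>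
    let column : List Int := [
      PySem.List.pyGetD (PySem.List.pyGetD puzzle 0 []) x 0,
      PySem.List.pyGetD (PySem.List.pyGetD puzzle 1 []) x 0,
      PySem.List.pyGetD (PySem.List.pyGetD puzzle 2 []) x 0,
      PySem.List.pyGetD (PySem.List.pyGetD puzzle 3 []) x 0,
      PySem.List.pyGetD (PySem.List.pyGetD puzzle 4 []) x 0]
    pvInnerA column five valid) true
  if valid then true else false

-- ===== PORT B =====
-- '[v for v in column if v in (1, 2, 3, 4, 5)]'
def pvDigits (col : List Int) : List Int :=
  col.filter (fun v => ([1, 2, 3, 4, 5] : List Int).contains v)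

-- 'for x in range(5): column = [puzzle[y][x] for y in range(5)]; … return False' (early return)
def pvGoB (puzzle : List (List Int)) : List Int → Bool
  | [] => true
  | x :: xs =>
    let column := (PySem.List.pyRange 0 5 1).map
      (fun y => PySem.List.pyGetD (PySem.List.pyGetD puzzle y []) x 0)
    let digits := pvDigits column
    if (PySem.Set.ofList digits).length ≠ digits.length then false
    else pvGoB puzzle xs

def check_columns_valid_alt (puzzle : List (List Int)) : Bool :=
  pvGoB puzzle (PySem.List.pyRange 0 5 1)

-- ===== PRECONDITION & SPEC =====
-- A indexes puzzle[0..4][0..4]; it raises IndexError when the puzzle has fewer than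
-- five rows or one of the first five rows has fewer than five entries.
def Pre_check_columns_valid (puzzle : List (List Int)) : Prop :=
  5 ≤ puzzle.length ∧ ∀ r ∈ puzzle.take 5, 5 ≤ r.length
instance (puzzle : List (List Int)) : Decidable (Pre_check_columns_valid puzzle) := by
  unfold Pre_check_columns_valid; infer_instance

def pvWitness_check_columns_valid : List (List Int) :=
  [[1,2,3,4,5],[2,3,4,5,1],[3,4,5,1,2],[4,5,1,2,3],[5,1,2,3,4]]

def Spec_check_columns_valid (puzzle : List (List Int)) (out : Bool) : Prop := out = check_columns_valid_alt puzzle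
instance (puzzle : List (List Int)) (out : Bool) : Decidable (Spec_check_columns_valid puzzle out) := by unfold Spec_check_columns_valid; infer_instance

-- ===== CLAIM (what is proved, stated in full; the proofs are below) =====
def Claim_equal_check_columns_valid : Prop := ∀ (puzzle : List (List Int)), Dom_check_columns_valid puzzle → Pre_check_columns_valid puzzle → Spec_check_columns_valid puzzle (check_columns_valid puzzle)

-- ===== LEMMAS AND PROOFS =====

-- a column passes A's check iff every value 1..5 occurs at most once in it
def pvColOK (col : List Int) : Bool :=
  ([1, 2, 3, 4, 5] : List Int).all (fun i => PySem.List.count col i ≤ 1)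

theorem pvInnerA_eq (column : List Int) (l : List Int) (valid : Bool) :
    pvInnerA column l valid =
      if l.all (fun i => PySem.List.count column i ≤ 1) then valid else false := by
  induction l with
  | nil => simp [pvInnerA]
  | cons i rest ih =>
    simp only [pvInnerA, ih, List.all_cons]
    by_cases h : List.count i column ≤ 1
    · rw [if_neg (show ¬ 1 < PySem.List.count column i by rw [PySem.List.count_eq]; omega)]
      simp [h]
    · rw [if_pos (show 1 < PySem.List.count column i by rw [PySem.List.count_eq]; omega)]
      simp [h]

theorem pvInnerA_colOK (column : List Int) (valid : Bool) :
    pvInnerA column [1, 2, 3, 4, 5] valid = if pvColOK column then valid else false :=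
  pvInnerA_eq column [1, 2, 3, 4, 5] valid

-- len(set(digits)) == len(digits) exactly when the digit list has no duplicate
theorem pvSetLen_eq_iff (ds : List Int) :
    (PySem.Set.ofList ds).length = ds.length ↔ ds.Nodup := by
  have hfs : (PySem.Set.ofList ds).toFinset = ds.toFinset := by
    ext a; simp [PySem.Set.mem_ofList]
  have h1 : (PySem.Set.ofList ds).length = ds.dedup.length := by
    rw [← List.toFinset_card_of_nodup (PySem.Set.nodup_ofList ds), hfs, List.card_toFinset]
  rw [h1]
  constructor
  · intro h
    have := (List.dedup_sublist ds).eq_of_length h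
    rw [← this]; exact ds.nodup_dedup
  · intro h; rw [List.dedup_eq_self.mpr h]

-- B's per-column test agrees with A's per-column test
theorem pvDigits_nodup_iff (col : List Int) : (pvDigits col).Nodup ↔ pvColOK col = true := by
  rw [List.nodup_iff_count_le_one]
  unfold pvColOK
  simp only [List.all_eq_true, decide_eq_true_eq, PySem.List.count_eq]
  constructor
  · intro h i hi
    have := h i
    rwa [pvDigits, List.count_filter (by simpa using hi)] at this
  · intro h a
    by_cases ha : a ∈ ([1,2,3,4,5] : List Int)
    · rw [pvDigits, List.count_filter (by simpa using ha)]
      exact h a ha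
    · have : List.count a (pvDigits col) = 0 :=
        List.count_eq_zero.mpr (fun hm => ha (by simpa using List.of_mem_filter hm))
      omega

theorem pvColB_if (col : List Int) (b : Bool) :
    (if (PySem.Set.ofList (pvDigits col)).length ≠ (pvDigits col).length then false else b)
      = if pvColOK col then b else false := by
  by_cases h : pvColOK col = true
  · have hn : (PySem.Set.ofList (pvDigits col)).length = (pvDigits col).length :=
      (pvSetLen_eq_iff _).mpr ((pvDigits_nodup_iff col).mpr h)
    simp [hn, h]
  · have hn : (PySem.Set.ofList (pvDigits col)).length ≠ (pvDigits col).length := by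
      intro he
      exact h ((pvDigits_nodup_iff col).mp ((pvSetLen_eq_iff _).mp he))
    simp [hn, h]

theorem pvExists5 {A : Type} (r : List A) (h : 5 ≤ r.length) :
    ∃ a b c d e t, r = a :: b :: c :: d :: e :: t := by
  rcases r with _ | ⟨a, _ | ⟨b, _ | ⟨c, _ | ⟨d, _ | ⟨e, t⟩⟩⟩⟩⟩
  · simp at h
  · simp at h
  · simp at h
  · simp at h
  · simp at h
  · exact ⟨a, b, c, d, e, t, rfl⟩

theorem pvG0 {A : Type} (a b c d e : A) (t : List A) (x : A) :
    PySem.List.pyGetD (a :: b :: c :: d :: e :: t) (0 : Int) x = a := by simp [pysem]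
theorem pvG1 {A : Type} (a b c d e : A) (t : List A) (x : A) :
    PySem.List.pyGetD (a :: b :: c :: d :: e :: t) (1 : Int) x = b := by simp [pysem]
theorem pvG2 {A : Type} (a b c d e : A) (t : List A) (x : A) :
    PySem.List.pyGetD (a :: b :: c :: d :: e :: t) (2 : Int) x = c := by simp [pysem]
theorem pvG3 {A : Type} (a b c d e : A) (t : List A) (x : A) :
    PySem.List.pyGetD (a :: b :: c :: d :: e :: t) (3 : Int) x = d := by simp [pysem]
theorem pvG4 {A : Type} (a b c d e : A) (t : List A) (x : A) :
    PySem.List.pyGetD (a :: b :: c :: d :: e :: t) (4 : Int) x = e := by simp [pysem]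

-- ===== VERDICT (by name: the statement is the Claim_ definition above) =====
set_option maxHeartbeats 1000000 in
theorem check_columns_valid_spec : Claim_equal_check_columns_valid := by
  intro puzzle _ hpre
  obtain ⟨hlen, hrows⟩ := hpre
  obtain ⟨r0, r1, r2, r3, r4, ps, rfl⟩ := pvExists5 puzzle hlen
  have h0 : 5 ≤ r0.length := hrows r0 (by simp)
  have h1 : 5 ≤ r1.length := hrows r1 (by simp)
  have h2 : 5 ≤ r2.length := hrows r2 (by simp)
  have h3 : 5 ≤ r3.length := hrows r3 (by simp)
  have h4 : 5 ≤ r4.length := hrows r4 (by simp)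
  obtain ⟨a00, a01, a02, a03, a04, t0, rfl⟩ := pvExists5 r0 h0
  obtain ⟨a10, a11, a12, a13, a14, t1, rfl⟩ := pvExists5 r1 h1
  obtain ⟨a20, a21, a22, a23, a24, t2, rfl⟩ := pvExists5 r2 h2
  obtain ⟨a30, a31, a32, a33, a34, t3, rfl⟩ := pvExists5 r3 h3
  obtain ⟨a40, a41, a42, a43, a44, t4, rfl⟩ := pvExists5 r4 h4
  unfold Spec_check_columns_valid check_columns_valid check_columns_valid_alt
  have hr : PySem.List.pyRange 0 5 1 = [(0 : Int), 1, 2, 3, 4] := by decide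
  simp only [hr, List.foldl_cons, List.foldl_nil, List.map_cons, List.map_nil,
    pvG0, pvG1, pvG2, pvG3, pvG4, pvInnerA_colOK, pvGoB, pvColB_if]
  generalize pvColOK [a00, a10, a20, a30, a40] = k0
  generalize pvColOK [a01, a11, a21, a31, a41] = k1
  generalize pvColOK [a02, a12, a22, a32, a42] = k2
  generalize pvColOK [a03, a13, a23, a33, a43] = k3
  generalize pvColOK [a04, a14, a24, a34, a44] = k4
  cases k0 <;> cases k1 <;> cases k2 <;> cases k3 <;> cases k4 <;> rfl
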